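-- pv_equiv track=rewrite | github.com/tsvtln/SoftUniFundamentals | 28_Text_Processing/Exercise/10_winning_ticket.py | check_ticket
-- ===== SOURCE A (Python) =====
-- def check_ticket(ticket):
--     if len(ticket) != 20:
--         return "invalid ticket"
--     winning_symbols = ['@', '#', '$', '^']
--     left_part = ticket[:10]
--     right_part = ticket[10:]
--     for match_symbol in winning_symbols:
--         for uninterrupted_match_length in range(10, 5, -1):
--             winning_symbols_repetition = match_symbol * uninterrupted_match_length
--             if winning_symbols_repetition in left_part and winning_symbols_repetition in right_part:
--                 if uninterrupted_match_length == 10: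
--                     return f'ticket "{ticket}" - {uninterrupted_match_length}{match_symbol} Jackpot!'
--                 return f'ticket "{ticket}" - {uninterrupted_match_length}{match_symbol}'
--     return f'ticket "{ticket}" - no match'
-- ===== SOURCE B (Python) =====
-- def _max_run(char, s):
--     best = cur = 0
--     for ch in s:
--         cur = cur + 1 if ch == char else 0
--         if cur > best:
--             best = cur
--     return best
--
--
-- def check_ticket(ticket):
--     if len(ticket) != 20:
--         return "invalid ticket"
--     left = ticket[:10]
--     right = ticket[10:]
--     for symbol in ['@', '#', '$', '^']:
--         m = min(_max_run(symbol, left), _max_run(symbol, right))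
--         if m >= 6:
--             jackpot = " Jackpot!" if m == 10 else ""
--             return f'ticket "{ticket}" - {m}{symbol}{jackpot}'
--     return f'ticket "{ticket}" - no match'
-- ===== Notes on version B (the rewrite author's own statement) =====
-- stated objective: idiomatic
-- what changed: Instead of testing substring containment of sym*k for each k from 10 down to 6 in both halves, B computes the longest consecutive run of each symbol in each half with one linear scan and uses min(left_run, right_run) directly as the match length.
import Mathlib
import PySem

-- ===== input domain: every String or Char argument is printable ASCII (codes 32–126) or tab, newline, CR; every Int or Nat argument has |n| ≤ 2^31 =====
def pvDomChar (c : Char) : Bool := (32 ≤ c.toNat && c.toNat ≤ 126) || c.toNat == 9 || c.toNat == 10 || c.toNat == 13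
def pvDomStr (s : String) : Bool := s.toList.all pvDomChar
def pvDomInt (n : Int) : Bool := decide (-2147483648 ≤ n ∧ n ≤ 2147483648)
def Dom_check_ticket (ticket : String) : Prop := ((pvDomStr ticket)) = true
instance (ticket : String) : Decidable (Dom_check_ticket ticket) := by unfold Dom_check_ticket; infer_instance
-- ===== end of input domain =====

-- B replaces A's substring tests of sym*k for k = 10..6 by one linear max-run scan per half; the return values are proved equal.

-- ===== PORT A =====
-- inner loop: for uninterrupted_match_length in range(10, 5, -1)
def aInner (ticket left right : String) (sym : Char) : List Int → Option String
  | [] => none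
  | k :: ks =>
    let rep : String := String.ofList (PySem.List.pyRepeat [sym] k)
    if PySem.Str.isIn rep left && PySem.Str.isIn rep right then
      if k = 10 then
        some ("ticket \"" ++ ticket ++ "\" - " ++ PySem.Int.toStr k ++ String.ofList [sym] ++ " Jackpot!")
      else
        some ("ticket \"" ++ ticket ++ "\" - " ++ PySem.Int.toStr k ++ String.ofList [sym])
    else aInner ticket left right sym ks

-- outer loop: for match_symbol in winning_symbols
def aOuter (ticket left right : String) : List Char → Option String
  | [] => none
  | sym :: syms =>
    match aInner ticket left right sym (PySem.List.pyRange 10 5 (-1)) with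
    | some r => some r
    | none => aOuter ticket left right syms

def check_ticket (ticket : String) : String :=
  if PySem.Str.len ticket ≠ 20 then "invalid ticket"
  else
    let left := PySem.Str.slice ticket none (some 10)
    let right := PySem.Str.slice ticket (some 10) none
    match aOuter ticket left right ['@', '#', '$', '^'] with
    | some r => r
    | none => "ticket \"" ++ ticket ++ "\" - no match"

-- ===== PORT B =====
-- _max_run: one linear scan with (cur, best) accumulators
def maxRunFold (c : Char) (s : String) : Nat :=
  (s.toList.foldl
    (fun (st : Nat × Nat) ch =>
      let cur := if ch = c then st.1 + 1 else 0
      (cur, if cur > st.2 then cur else st.2))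
    (0, 0)).2

-- for symbol in ['@', '#', '$', '^']
def bOuter (ticket left right : String) : List Char → Option String
  | [] => none
  | sym :: syms =>
    let m := min (maxRunFold sym left) (maxRunFold sym right)
    if m ≥ 6 then
      let jackpot := if m = 10 then " Jackpot!" else ""
      some ("ticket \"" ++ ticket ++ "\" - " ++ PySem.Int.toStr (m : Int) ++ String.ofList [sym] ++ jackpot)
    else bOuter ticket left right syms

def check_ticket_alt (ticket : String) : String :=
  if PySem.Str.len ticket ≠ 20 then "invalid ticket"
  else
    let left := PySem.Str.slice ticket none (some 10)
    let right := PySem.Str.slice ticket (some 10) none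
    match bOuter ticket left right ['@', '#', '$', '^'] with
    | some r => r
    | none => "ticket \"" ++ ticket ++ "\" - no match"

-- ===== PRECONDITION & SPEC =====
def Spec_check_ticket (ticket : String) (out : String) : Prop := out = check_ticket_alt ticket
instance (ticket : String) (out : String) : Decidable (Spec_check_ticket ticket out) := by unfold Spec_check_ticket; infer_instance

-- ===== CLAIM (what is proved, stated in full; the proofs are below) =====
def Claim_equal_check_ticket : Prop := ∀ (ticket : String), Dom_check_ticket ticket → Spec_check_ticket ticket (check_ticket ticket)

-- ===== LEMMAS AND PROOFS =====

-- length of the prefix run of c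
def runLen (c : Char) : List Char → Nat
  | [] => 0
  | x :: xs => if x = c then runLen c xs + 1 else 0

-- longest run of c anywhere in the list
def maxRun (c : Char) : List Char → Nat
  | [] => 0
  | x :: xs => max (runLen c (x :: xs)) (maxRun c xs)

lemma runLen_le_maxRun (c : Char) (s : List Char) : runLen c s ≤ maxRun c s := by
  cases s with
  | nil => exact le_refl _
  | cons x xs => exact le_max_left _ _

lemma runLen_le_length (c : Char) (s : List Char) : runLen c s ≤ s.length := by
  induction s with
  | nil => simp [runLen]
  | cons x xs ih => by_cases h : x = c <;> simp [runLen, h] <;> omega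

lemma maxRun_le_length (c : Char) (s : List Char) : maxRun c s ≤ s.length := by
  induction s with
  | nil => simp [maxRun]
  | cons x xs ih =>
    have := runLen_le_length c (x :: xs)
    simp only [maxRun, List.length_cons] at *
    omega

lemma replicate_prefix_iff (c : Char) (k : Nat) (t : List Char) :
    List.replicate k c <+: t ↔ k ≤ runLen c t := by
  induction t generalizing k with
  | nil =>
    cases k with
    | zero => simp [runLen]
    | succ n => simp [runLen, List.replicate_succ]
  | cons x xs ih =>
    cases k with
    | zero => simp
    | succ n =>
      rw [List.replicate_succ, List.cons_prefix_cons]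
      by_cases h : x = c
      · subst h
        rw [ih]
        simp [runLen]
      · simp only [runLen, if_neg h]
        constructor
        · rintro ⟨he, -⟩
          exact absurd he.symm h
        · omega

lemma replicate_infix_iff (c : Char) (k : Nat) (s : List Char) :
    List.replicate k c <:+: s ↔ k ≤ maxRun c s := by
  induction s with
  | nil => simp [maxRun, List.replicate_eq_nil_iff]
  | cons x xs ih =>
    rw [List.infix_cons_iff, replicate_prefix_iff, ih]
    simp only [maxRun]
    omega

-- carried-run value of B's scan starting from current run length `cur`
def carryRun (c : Char) (cur : Nat) : List Char → Nat
  | [] => 0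
  | x :: xs =>
    let cur' := if x = c then cur + 1 else 0
    max cur' (carryRun c cur' xs)

lemma foldl_maxRun (c : Char) (s : List Char) : ∀ cur best : Nat,
    (s.foldl
      (fun (st : Nat × Nat) ch =>
        let cur := if ch = c then st.1 + 1 else 0
        (cur, if cur > st.2 then cur else st.2))
      (cur, best)).2 = max best (carryRun c cur s) := by
  induction s with
  | nil => intro cur best; simp [carryRun]
  | cons x xs ih =>
    intro cur best
    simp only [List.foldl_cons, carryRun, ih]
    split_ifs <;> omega

lemma carryRun_eq (c : Char) (s : List Char) : ∀ cur : Nat,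
    carryRun c cur s =
      if runLen c s = 0 then maxRun c s else max (cur + runLen c s) (maxRun c s) := by
  induction s with
  | nil => intro cur; simp [carryRun, runLen, maxRun]
  | cons x xs ih =>
    intro cur
    by_cases h : x = c
    · have h1 := ih (cur + 1)
      have h2 := runLen_le_maxRun c xs
      simp only [carryRun, runLen, maxRun, h, if_true] at *
      by_cases hr : runLen c xs = 0 <;> simp [hr] at * <;> omega
    · have h1 := ih 0
      have h2 := runLen_le_maxRun c xs
      simp only [carryRun, runLen, maxRun, h, if_false] at *
      by_cases hr : runLen c xs = 0 <;> simp [hr] at * <;> omega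

lemma maxRunFold_eq (c : Char) (s : String) : maxRunFold c s = maxRun c s.toList := by
  unfold maxRunFold
  rw [foldl_maxRun, carryRun_eq]
  have := runLen_le_maxRun c s.toList
  by_cases hr : runLen c s.toList = 0 <;> simp [hr] <;> omega

lemma isIn_replicate_iff (c : Char) (k : Nat) (s : String) :
    PySem.Str.isIn (String.ofList (List.replicate k c)) s = true ↔ k ≤ maxRun c s.toList := by
  rw [PySem.Str.isIn_iff_infix]
  simp only [String.toList_ofList]
  exact replicate_infix_iff c k s.toList

lemma cond_iff (c : Char) (k : Int) (l r : String) :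
    ((PySem.Str.isIn (String.ofList (List.replicate k.toNat c)) l &&
      PySem.Str.isIn (String.ofList (List.replicate k.toNat c)) r) = true)
    ↔ k.toNat ≤ min (maxRun c l.toList) (maxRun c r.toList) := by
  rw [Bool.and_eq_true, isIn_replicate_iff, isIn_replicate_iff, le_min_iff]

set_option maxHeartbeats 1000000 in
lemma head_eq (t l r : String) (sym : Char) (hl : l.toList.length ≤ 10) :
    aInner t l r sym (PySem.List.pyRange 10 5 (-1)) =
      (if min (maxRunFold sym l) (maxRunFold sym r) ≥ 6 then
        some ("ticket \"" ++ t ++ "\" - " ++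
          PySem.Int.toStr (↑(min (maxRunFold sym l) (maxRunFold sym r))) ++ String.ofList [sym] ++
          (if min (maxRunFold sym l) (maxRunFold sym r) = 10 then " Jackpot!" else ""))
      else none) := by
  have hrange : PySem.List.pyRange 10 5 (-1) = [10, 9, 8, 7, 6] := by decide
  rw [hrange]
  simp only [maxRunFold_eq]
  have hm10 : min (maxRun sym l.toList) (maxRun sym r.toList) ≤ 10 :=
    le_trans (min_le_left _ _) (le_trans (maxRun_le_length sym l.toList) hl)
  simp only [aInner, PySem.List.pyRepeat_singleton, cond_iff, ge_iff_le]
  split_ifs <;>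
    first
      | rfl
      | omega
      | (rcases (show min (maxRun sym l.toList) (maxRun sym r.toList) = 6 ∨
            min (maxRun sym l.toList) (maxRun sym r.toList) = 7 ∨
            min (maxRun sym l.toList) (maxRun sym r.toList) = 8 ∨
            min (maxRun sym l.toList) (maxRun sym r.toList) = 9 ∨
            min (maxRun sym l.toList) (maxRun sym r.toList) = 10 from by omega)
          with h | h | h | h | h <;> first | omega | (rw [h]; simp))

lemma outer_eq (t l r : String) (hl : l.toList.length ≤ 10) (syms : List Char) :
    aOuter t l r syms = bOuter t l r syms := by
  induction syms with
  | nil => rfl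
  | cons sym rest ih =>
    simp only [aOuter, bOuter, head_eq t l r sym hl, ih, ge_iff_le]
    split_ifs <;> rfl

-- ===== VERDICT (by name: the statement is the Claim_ definition above) =====
theorem check_ticket_spec : Claim_equal_check_ticket := by
  intro ticket _
  unfold Spec_check_ticket check_ticket check_ticket_alt
  by_cases h : PySem.Str.len ticket ≠ 20
  · rw [if_pos h, if_pos h]
  · rw [if_neg h, if_neg h]
    have hl : (PySem.Str.slice ticket none (some 10)).toList.length ≤ 10 := by
      simp [pysem]
    simp only [outer_eq _ _ _ hl]
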